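-- pv_equiv track=rewrite | github.com/uriellmendezz/Buscador-multiplataforma-PNL | recommender.py | slugify_tag
-- ===== SOURCE A (Python) =====
-- from unicodedata import normalize as uni_normalize
--
-- def slugify_tag(s: str) -> str:
--     """
--     Normaliza a TAG: mayúsculas, sin acentos, separadores -> underscore.
--     """
--     if not isinstance(s, str):
--         return ""
--     s = s.strip().upper()
--     s = uni_normalize("NFKD", s).encode("ascii", "ignore").decode("ascii")
--     for ch in [" ", "-", ".", "/", ":", ";", ","]:
--         s = s.replace(ch, "_")
--     return s
-- ===== SOURCE B (Python) =====
-- from unicodedata import normalize as uni_normalize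
--
-- _SEPS = " -./:;,"
--
-- def slugify_tag(s: str) -> str:
--     """
--     Normaliza a TAG: mayusculas, sin acentos, separadores -> underscore.
--     """
--     if not isinstance(s, str):
--         return ""
--     s = s.strip().upper()
--     s = uni_normalize("NFKD", s).encode("ascii", "ignore").decode("ascii")
--     return "".join("_" if ch in _SEPS else ch for ch in s)
-- ===== Notes on version B (the rewrite author's own statement) =====
-- stated objective: simpler
-- what changed: The seven sequential str.replace passes (one full rescan per separator) are replaced by a single left-to-right pass over the folded string that maps each separator character to an underscore via one membership test.
import Mathlib
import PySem

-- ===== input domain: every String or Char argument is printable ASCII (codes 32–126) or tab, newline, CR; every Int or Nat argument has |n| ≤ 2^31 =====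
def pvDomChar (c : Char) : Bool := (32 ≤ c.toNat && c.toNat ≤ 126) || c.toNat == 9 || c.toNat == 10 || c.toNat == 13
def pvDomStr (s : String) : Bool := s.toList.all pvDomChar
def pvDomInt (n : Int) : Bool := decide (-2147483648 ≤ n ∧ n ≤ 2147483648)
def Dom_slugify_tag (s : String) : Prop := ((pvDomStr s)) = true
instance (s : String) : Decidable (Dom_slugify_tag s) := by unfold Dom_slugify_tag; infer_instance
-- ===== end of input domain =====

-- B replaces A's seven sequential single-char replace passes with one pass mapping
-- separator characters to '_' via a membership test (objective: simpler).


-- ===== PORT A =====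
def slugify_tag (s : String) : String :=
  -- s.strip().upper()
  let s1 := PySem.Str.upper (PySem.Str.strip s)
  -- uni_normalize("NFKD", s).encode("ascii", "ignore").decode("ascii"):
  -- NFKD is the identity on ASCII text, so on the ASCII domain this step is exactly
  -- "drop the non-ASCII code points" (hand port, exact on Dom_slugify_tag).
  let s2 := String.ofList (s1.toList.filter (fun c => c.toNat < 128))
  -- for ch in [" ", "-", ".", "/", ":", ";", ","]: s = s.replace(ch, "_")
  ([' ', '-', '.', '/', ':', ';', ','].foldl
    (fun t ch => PySem.Str.replace t (String.ofList [ch]) "_") s2)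

-- ===== PORT B =====
-- _SEPS = " -./:;,"
def slugifySeps : List Char := [' ', '-', '.', '/', ':', ';', ',']

def slugify_tag_alt (s : String) : String :=
  let s1 := PySem.Str.upper (PySem.Str.strip s)
  -- same NFKD/ascii fold as A (hand port, exact on Dom_slugify_tag)
  let s2 := (s1.toList.filter (fun c => c.toNat < 128))
  -- "".join("_" if ch in _SEPS else ch for ch in s)
  String.ofList (s2.map (fun c => if slugifySeps.contains c then '_' else c))

-- ===== PRECONDITION & SPEC =====
def Spec_slugify_tag (s : String) (out : String) : Prop := out = slugify_tag_alt s
instance (s : String) (out : String) : Decidable (Spec_slugify_tag s out) := by unfold Spec_slugify_tag; infer_instance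

-- ===== CLAIM (what is proved, stated in full; the proofs are below) =====
def Claim_equal_slugify_tag : Prop := ∀ (s : String), Dom_slugify_tag s → Spec_slugify_tag s (slugify_tag s)

-- ===== LEMMAS AND PROOFS =====

/-- Replacing a single character by a single character is a pointwise map. -/
theorem replace_go_single (a b : Char) :
    ∀ (fuel : Nat) (l acc : List Char), l.length ≤ fuel →
      PySem.Chars.replace.go [a] [b] fuel l acc
        = acc.reverse ++ l.map (fun c => if c = a then b else c) := by
  intro fuel
  induction fuel with
  | zero =>
      intro l acc h
      have : l = [] := List.eq_nil_of_length_eq_zero (Nat.le_zero.mp h)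
      subst this
      simp [PySem.Chars.replace.go]
  | succ n ih =>
      intro l acc h
      cases l with
      | nil => simp [PySem.Chars.replace.go]
      | cons c t =>
          simp only [PySem.Chars.replace.go]
          by_cases hca : c = a
          · subst hca
            have hp : [c].isPrefixOf (c :: t) = true := by
              simp [List.isPrefixOf]
            rw [if_pos hp]
            have hd : List.drop [c].length (c :: t) = t := rfl
            rw [hd]
            have ht : t.length ≤ n := by simpa using h
            rw [ih _ _ ht]
            simp
          · have hp : [a].isPrefixOf (c :: t) = false := by
              simp [List.isPrefixOf]
              exact fun h' => (hca h'.symm).elim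
            rw [if_neg (by simp [hp])]
            have ht : t.length ≤ n := by simpa using h
            rw [ih _ _ ht]
            simp [hca]

theorem replace_single (a b : Char) (l : List Char) :
    PySem.Chars.replace l [a] [b] = l.map (fun c => if c = a then b else c) := by
  simp only [PySem.Chars.replace, List.isEmpty_cons, Bool.false_eq_true, if_false]
  simpa using replace_go_single a b l.length l [] (le_refl _)

/-- Folding single-char replaces to '_' over a separator list not containing '_'
    is one membership-test map. -/
theorem foldl_replace_eq_map (seps : List Char) (h : '_' ∉ seps) :
    ∀ l : List Char,
      seps.foldl (fun cs a => PySem.Chars.replace cs [a] ['_']) l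
        = l.map (fun c => if seps.contains c then '_' else c) := by
  induction seps with
  | nil => intro l; simp
  | cons a rest ih =>
      intro l
      have h' : '_' ∉ rest := fun hm => h (List.mem_cons_of_mem _ hm)
      simp only [List.foldl_cons]
      rw [replace_single, ih (fun hm => h (List.mem_cons_of_mem _ hm)), List.map_map]
      apply List.map_congr_left
      intro c _
      by_cases hca : c = a
      · subst hca
        have hr : rest.contains '_' = false := by simpa using h'
        simp [Function.comp, hr]
      · simp [hca, Function.comp]

/-- The String-level replace fold equals the Chars-level fold. -/
theorem foldl_str_replace (seps : List Char) :
    ∀ l : List Char,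
      seps.foldl (fun t ch => PySem.Str.replace t (String.ofList [ch]) "_") (String.ofList l)
        = String.ofList (seps.foldl (fun cs a => PySem.Chars.replace cs [a] ['_']) l) := by
  induction seps with
  | nil => intro l; simp
  | cons a rest ih =>
      intro l
      simp only [List.foldl_cons]
      have : PySem.Str.replace (String.ofList l) (String.ofList [a]) "_"
          = String.ofList (PySem.Chars.replace l [a] ['_']) := by
        apply String.ext  -- strings with equal char lists are equal
        simp [PySem.Str.toList_replace]
      rw [this, ih]

-- ===== VERDICT (by name: the statement is the Claim_ definition above) =====
theorem slugify_tag_spec : Claim_equal_slugify_tag := by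
  intro s _
  unfold Spec_slugify_tag slugify_tag slugify_tag_alt
  simp only []
  rw [foldl_str_replace]
  rw [foldl_replace_eq_map _ (by decide)]
  rfl
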